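-- pv_equiv track=rewrite | github.com/niamhtelnyx/quinn-daily-metrics | ae_call_analysis/services/transcript_processor.py | _extract_section_from_start
-- ===== SOURCE A (Python) =====
-- from typing import Dict, Any, Optional, List, Tuple
--
-- def _extract_section_from_start(
--
--     lines: List[str],
--     max_chars: int
-- ) -> Tuple[str, int]:
--     """Extract section from start of transcript"""
--     section_lines = []
--     total_chars = 0
--
--     for i, line in enumerate(lines):
--         if total_chars + len(line) + 1 > max_chars:
--             break
--         section_lines.append(line)
--         total_chars += len(line) + 1
--
--     return '\n'.join(section_lines), len(section_lines)
-- ===== SOURCE B (Python) =====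
-- def _extract_section_from_start(lines, max_chars):
--     """Two-stage: build prefix-sum table of line costs, then count fitting prefixes."""
--     cumsums = []
--     total = 0
--     for line in lines:
--         total += len(line) + 1
--         cumsums.append(total)
--     count = sum(1 for c in cumsums if c <= max_chars)
--     return '\n'.join(lines[:count]), count
-- ===== Notes on version B (the rewrite author's own statement) =====
-- stated objective: alternative
-- what changed: Replaces the single break-on-overflow loop by two stages: a prefix-sum table of cumulative line costs, then a count of sums within the budget (valid since costs are strictly positive, so the sums are strictly increasing), with the result taken as lines[:count].
import Mathlib
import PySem

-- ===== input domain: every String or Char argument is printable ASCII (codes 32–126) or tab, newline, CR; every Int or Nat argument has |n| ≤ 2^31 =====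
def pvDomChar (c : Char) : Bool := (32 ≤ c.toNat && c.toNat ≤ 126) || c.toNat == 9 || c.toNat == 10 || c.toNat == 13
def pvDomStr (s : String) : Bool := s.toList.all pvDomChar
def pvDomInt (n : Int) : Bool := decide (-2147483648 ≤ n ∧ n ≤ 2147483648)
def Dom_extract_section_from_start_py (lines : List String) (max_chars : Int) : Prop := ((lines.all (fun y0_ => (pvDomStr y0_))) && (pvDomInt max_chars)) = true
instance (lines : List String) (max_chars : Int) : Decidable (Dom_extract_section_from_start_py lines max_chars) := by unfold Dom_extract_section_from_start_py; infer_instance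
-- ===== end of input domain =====

-- B restructures A's single break-on-overflow loop into two stages (a prefix-sum table of
-- line costs, then a count of sums within the budget); same cost, no speed claim.

-- ===== PORT A =====
-- the for-loop with break: carries (remaining lines, total_chars, section_lines)
def extractLoopA (max_chars : Int) : List String → Int → List String → List String
  | [], _, acc => acc
  | line :: rest, total, acc =>
    if total + PySem.Str.len line + 1 > max_chars then acc
    else extractLoopA max_chars rest (total + PySem.Str.len line + 1) (acc ++ [line])

def extract_section_from_start_py (lines : List String) (max_chars : Int) : String × Int :=
  let section_lines := extractLoopA max_chars lines 0 []
  (PySem.Str.join "\n" section_lines, (section_lines.length : Int))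

-- ===== PORT B =====
def extract_section_from_start_py_alt (lines : List String) (max_chars : Int) : String × Int :=
  let cumsums : List Int := (lines.foldl
    (fun (st : Int × List Int) line =>
      (st.1 + PySem.Str.len line + 1, st.2 ++ [st.1 + PySem.Str.len line + 1]))
    (0, [])).2
  let count : Int := cumsums.foldl (fun s c => if c ≤ max_chars then s + 1 else s) 0
  (PySem.Str.join "\n" (PySem.List.slice lines none (some count)), count)

-- ===== PRECONDITION & SPEC =====
def Spec_extract_section_from_start_py (lines : List String) (max_chars : Int) (out : String × Int) : Prop := out = extract_section_from_start_py_alt lines max_chars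
instance (lines : List String) (max_chars : Int) (out : String × Int) : Decidable (Spec_extract_section_from_start_py lines max_chars out) := by unfold Spec_extract_section_from_start_py; infer_instance

-- ===== CLAIM (what is proved, stated in full; the proofs are below) =====
def Claim_equal_extract_section_from_start_py : Prop := ∀ (lines : List String) (max_chars : Int), Dom_extract_section_from_start_py lines max_chars → Spec_extract_section_from_start_py lines max_chars (extract_section_from_start_py lines max_chars)

-- ===== LEMMAS AND PROOFS =====

-- recursive characterisation of B's prefix-sum table (parametrised by the running total)
def cumsFrom (t : Int) : List String → List Int
  | [] => []
  | l :: ls => (t + PySem.Str.len l + 1) :: cumsFrom (t + PySem.Str.len l + 1) ls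

theorem foldl_cums (lines : List String) : ∀ (t : Int) (ys : List Int),
    (lines.foldl
      (fun (st : Int × List Int) line =>
        (st.1 + PySem.Str.len line + 1, st.2 ++ [st.1 + PySem.Str.len line + 1]))
      (t, ys)).2 = ys ++ cumsFrom t lines := by
  induction lines with
  | nil => intro t ys; simp [cumsFrom]
  | cons l ls ih =>
    intro t ys
    simp only [List.foldl_cons, cumsFrom]
    rw [ih]
    simp

theorem str_len_nonneg (s : String) : 0 ≤ PySem.Str.len s := by
  simp [PySem.Str.len_eq]

theorem cumsFrom_gt (max_chars : Int) : ∀ (ls : List String) (t : Int), max_chars < t →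
    ∀ x ∈ cumsFrom t ls, max_chars < x := by
  intro ls
  induction ls with
  | nil => intro t _ x hx; simp [cumsFrom] at hx
  | cons l ls ih =>
    intro t ht x hx
    have hlen := str_len_nonneg l
    simp [cumsFrom] at hx
    rcases hx with h | h
    · omega
    · exact ih _ (by omega) x h

theorem countFoldl (max_chars : Int) : ∀ (cs : List Int) (s : Int),
    cs.foldl (fun s c => if c ≤ max_chars then s + 1 else s) s
      = s + ((cs.countP (fun c => decide (c ≤ max_chars)) : Int)) := by
  intro cs
  induction cs with
  | nil => intro s; simp
  | cons c cs ih =>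
    intro s
    by_cases h : c ≤ max_chars
    · simp [h, ih]; omega
    · simp [h, ih]

theorem loopA_eq (max_chars : Int) : ∀ (ls : List String) (t : Int) (acc : List String),
    extractLoopA max_chars ls t acc
      = acc ++ ls.take ((cumsFrom t ls).countP (fun c => decide (c ≤ max_chars))) := by
  intro ls
  induction ls with
  | nil => intro t acc; simp [extractLoopA, cumsFrom]
  | cons l ls ih =>
    intro t acc
    simp only [extractLoopA, cumsFrom]
    by_cases h : t + PySem.Str.len l + 1 > max_chars
    · rw [if_pos h]
      have hcnt : ((t + PySem.Str.len l + 1) :: cumsFrom (t + PySem.Str.len l + 1) ls).countP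
          (fun c => decide (c ≤ max_chars)) = 0 := by
        rw [List.countP_eq_zero]
        intro x hx
        simp only [List.mem_cons] at hx
        have hgt : max_chars < x := by
          rcases hx with rfl | hx
          · omega
          · exact cumsFrom_gt max_chars ls _ (by omega) x hx
        simpa using (by omega : ¬ x ≤ max_chars)
      rw [hcnt]
      simp
    · rw [if_neg h]
      have h0 : t + PySem.Str.len l + 1 ≤ max_chars := by omega
      have hcnt : ((t + PySem.Str.len l + 1) :: cumsFrom (t + PySem.Str.len l + 1) ls).countP
          (fun c => decide (c ≤ max_chars))
          = (cumsFrom (t + PySem.Str.len l + 1) ls).countP (fun c => decide (c ≤ max_chars)) + 1 := by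
        have h0' : t + (l.length : Int) + 1 ≤ max_chars := by
          simpa [PySem.Str.len_eq] using h0
        simp only [List.countP_cons]
        simp
        omega
      rw [ih, hcnt, List.take_succ_cons]
      simp

theorem take_countP_length (max_chars : Int) (ls : List String) (t : Int) :
    (ls.take ((cumsFrom t ls).countP (fun c => decide (c ≤ max_chars)))).length
      = (cumsFrom t ls).countP (fun c => decide (c ≤ max_chars)) := by
  rw [List.length_take]
  have hlen : ∀ (ls : List String) (t : Int), (cumsFrom t ls).length = ls.length := by
    intro ls
    induction ls with
    | nil => intro t; simp [cumsFrom]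
    | cons l ls ih => intro t; simp [cumsFrom, ih]
  have h1 := List.countP_le_length (p := fun c => decide (c ≤ max_chars)) (l := cumsFrom t ls)
  have h2 := hlen ls t
  omega

-- ===== VERDICT (by name: the statement is the Claim_ definition above) =====
theorem extract_section_from_start_py_spec : Claim_equal_extract_section_from_start_py := by
  intro lines max_chars _
  unfold Spec_extract_section_from_start_py
  unfold extract_section_from_start_py extract_section_from_start_py_alt
  simp only [foldl_cums lines 0 [], List.nil_append, countFoldl, Int.zero_add]
  rw [PySem.List.slice_to _ (by positivity), Int.toNat_natCast, loopA_eq]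
  refine Prod.ext rfl ?_
  have h := take_countP_length max_chars lines 0
  simp only [List.nil_append]
  exact_mod_cast congrArg (Nat.cast : Nat → Int) h
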